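-- pv_equiv track=rewrite | github.com/onyxolu/DSA | Stripe/StackSplit_InnerBestCutTime.py | best_cut
-- ===== SOURCE A (Python) =====
-- def best_cut(segment: list[int]) -> dict:
--     """
--     Prefix Sum
--     One pass scan that uses prefix_ones and suffix_zeros counters.
--     Tie rule, choose the smallest t.
--     """
--     if not segment:
--         return {"error": "no data"}
--
--     n = len(segment)
--     prefix_ones = 0
--     suffix_zeros = segment.count(0)  # zeros in [0..n) when t equals 0
--
--     best_t = 0
--     best_penalty = prefix_ones + suffix_zeros  # penalty at t equals 0
--
--     for t in range(1, n + 1):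
--         prev = segment[t - 1]
--         if prev == 1:
--             prefix_ones += 1
--         else:
--             suffix_zeros -= 1
--
--         penalty = prefix_ones + suffix_zeros
--         if penalty < best_penalty:
--             best_penalty = penalty
--             best_t = t
--
--     return {"best_time": best_t, "mismatches": best_penalty}
-- ===== SOURCE B (Python) =====
-- def best_cut(segment: list[int]) -> dict:
--     """
--     Closed-form penalty: penalty(t) = zeros_total - t + 2*ones_in_prefix(t)
--     (the loop in the original decrements for ANY non-1 value, which this
--     identity reproduces exactly).  Build the prefix-ones table once, then
--     take the lexicographic minimum over (penalty, t) so ties go to the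
--     smallest t.
--     """
--     if not segment:
--         return {"error": "no data"}
--     c0 = segment.count(0)
--     ones = [0]
--     for x in segment:
--         ones.append(ones[-1] + (1 if x == 1 else 0))
--     best_t, best_penalty = min(
--         ((t, c0 - t + 2 * o) for t, o in enumerate(ones)),
--         key=lambda p: (p[1], p[0]))
--     return {"best_time": best_t, "mismatches": best_penalty}
-- ===== Notes on version B (the rewrite author's own statement) =====
-- stated objective: alternative
-- what changed: Replaces A's single stateful prefix-ones/suffix-zeros scan with a two-pass table method: build a prefix-ones table, evaluate the closed-form penalty(t) = zeros_total - t + 2*ones(t) for every t, and pick the lexicographic minimum over (penalty, t).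
-- outside the precondition, e.g. on best_cut([]): A returns {'error': 'no data'}, B returns {'error': 'no data'}
import Mathlib
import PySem

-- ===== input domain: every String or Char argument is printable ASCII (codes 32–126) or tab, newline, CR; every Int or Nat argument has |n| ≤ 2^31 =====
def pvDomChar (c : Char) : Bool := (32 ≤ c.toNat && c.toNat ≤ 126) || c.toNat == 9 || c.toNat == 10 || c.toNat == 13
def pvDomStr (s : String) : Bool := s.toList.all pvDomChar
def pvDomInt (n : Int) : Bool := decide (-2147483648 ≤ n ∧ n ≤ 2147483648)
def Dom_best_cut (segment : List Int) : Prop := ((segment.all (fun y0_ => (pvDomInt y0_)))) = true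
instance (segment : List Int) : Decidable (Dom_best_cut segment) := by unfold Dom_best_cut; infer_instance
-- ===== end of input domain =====

-- B replaces A's single stateful prefix-ones/suffix-zeros scan by a prefix-ones table plus the
-- closed-form penalty c0 - t + 2*ones(t), minimised lexicographically over (penalty, t);
-- an alternative decomposition of the same O(n) cost.

-- ===== PORT A =====
def best_cut (segment : List Int) : List (String × Int) :=
  if segment = [] then []   -- Python returns {"error": "no data"} (a str value); outside Pre_
  else
    let n : Int := PySem.List.len segment
    let c0 : Int := (PySem.List.count segment 0 : Int)
    let st :=
      (PySem.List.pyRange 1 (n + 1) 1).foldl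
        (fun (st : Int × Int × Int × Int) t =>
          let prev := PySem.List.pyGetD segment (t - 1) 0
          let prefix_ones := if prev = 1 then st.1 + 1 else st.1
          let suffix_zeros := if prev = 1 then st.2.1 else st.2.1 - 1
          let penalty := prefix_ones + suffix_zeros
          if penalty < st.2.2.2 then (prefix_ones, suffix_zeros, t, penalty)
          else (prefix_ones, suffix_zeros, st.2.2.1, st.2.2.2))
        (0, c0, 0, c0)
    [("best_time", st.2.2.1), ("mismatches", st.2.2.2)]

-- ===== PORT B =====
def best_cut_alt (segment : List Int) : List (String × Int) :=
  if segment = [] then []   -- Python returns {"error": "no data"} (a str value); outside Pre_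
  else
    let c0 : Int := (PySem.List.count segment 0 : Int)
    let ones : List Int :=
      segment.foldl
        (fun acc x => acc ++ [PySem.List.pyGetD acc (-1) 0 + (if x = 1 then 1 else 0)]) [0]
    let pairs : List (Int × Int) :=
      (PySem.List.enumerate ones 0).map (fun p => (p.1, c0 - p.1 + 2 * p.2))
    match PySem.List.min2? pairs (fun p => p.2) (fun p => p.1) with
    | some b => [("best_time", b.1), ("mismatches", b.2)]
    | none => []   -- unreachable: pairs always contains the t = 0 entry

-- ===== PRECONDITION & SPEC =====
-- Pre_ excludes only the empty list, on which A returns {"error": "no data"} — a string-valued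
-- entry that is not a value of the declared dict[str, int] result type.
def Pre_best_cut (segment : List Int) : Prop := segment ≠ []
instance (segment : List Int) : Decidable (Pre_best_cut segment) := by unfold Pre_best_cut; infer_instance
def pvWitness_best_cut : List Int := [1, 0, 2]

def Spec_best_cut (segment : List Int) (out : List (String × Int)) : Prop := out = best_cut_alt segment
instance (segment : List Int) (out : List (String × Int)) : Decidable (Spec_best_cut segment out) := by unfold Spec_best_cut; infer_instance

-- ===== CLAIM (what is proved, stated in full; the proofs are below) =====
def Claim_equal_best_cut : Prop := ∀ (segment : List Int), Dom_best_cut segment → Pre_best_cut segment → Spec_best_cut segment (best_cut segment)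

-- ===== LEMMAS AND PROOFS =====

-- ones among the first t elements, and the closed-form penalty at cut t
def pvOnes (xs : List Int) : Int := (xs.countP (fun v => decide (v = 1)) : Int)
def pvPen (c0 : Int) (xs : List Int) (t : Nat) : Int := c0 - t + 2 * pvOnes (xs.take t)
-- first strict minimum by second component (A's running-best update)
def pvSel (b : Int × Int) (l : List (Int × Int)) : Int × Int :=
  l.foldl (fun b p => if p.2 < b.2 then p else b) b
-- the (t, penalty) pairs for t = 1..n
def pvTail (c0 : Int) (xs : List Int) : List (Int × Int) :=
  (List.range xs.length).map (fun (k : Nat) => ((k : Int) + 1, pvPen c0 xs (k + 1)))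

lemma pvTail_append (c0 : Int) (xs : List Int) (x : Int) :
    pvTail c0 (xs ++ [x]) = pvTail c0 xs ++ [((xs.length : Int) + 1, pvPen c0 (xs ++ [x]) (xs.length + 1))] := by
  unfold pvTail
  rw [List.length_append, List.length_singleton, List.range_succ, List.map_append]
  congr 1
  apply List.map_congr_left
  intro k hk
  simp only [List.mem_range] at hk
  simp [pvPen, List.take_append_of_le_length (by omega : k + 1 ≤ xs.length)]

lemma pvSel_append (b : Int × Int) (l : List (Int × Int)) (p : Int × Int) :
    pvSel b (l ++ [p]) = if p.2 < (pvSel b l).2 then p else pvSel b l := by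
  unfold pvSel
  rw [List.foldl_append, List.foldl_cons, List.foldl_nil]

-- A's loop invariant: after the whole loop the state holds the total prefix-ones count,
-- the decremented zero counter, and the first strict minimum of the penalties at t = 1..n
lemma pvA1 (c0 : Int) (xs : List Int) :
    (PySem.List.pyRange 1 ((xs.length : Int) + 1) 1).foldl
      (fun (st : Int × Int × Int × Int) t =>
        let prev := PySem.List.pyGetD xs (t - 1) 0
        let prefix_ones := if prev = 1 then st.1 + 1 else st.1
        let suffix_zeros := if prev = 1 then st.2.1 else st.2.1 - 1
        let penalty := prefix_ones + suffix_zeros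
        if penalty < st.2.2.2 then (prefix_ones, suffix_zeros, t, penalty)
        else (prefix_ones, suffix_zeros, st.2.2.1, st.2.2.2))
      (0, c0, 0, c0)
      = (pvOnes xs, c0 - (xs.length - pvOnes xs), pvSel (0, c0) (pvTail c0 xs)) := by
  induction xs using List.reverseRecOn with
  | nil =>
    rw [PySem.List.pyRange_one_eq_nil (by simp)]
    simp [pvOnes, pvSel, pvTail]
  | append_singleton xs x ih =>
    have hlen : (((xs ++ [x]).length : Int) + 1) = ((xs.length : Int) + 1) + 1 := by
      simp only [List.length_append, List.length_singleton]; push_cast; ring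
    rw [hlen, PySem.List.pyRange_one_succ_right (by omega), List.foldl_append]
    have hcongr :
        (PySem.List.pyRange 1 ((xs.length : Int) + 1) 1).foldl
          (fun (st : Int × Int × Int × Int) t =>
            let prev := PySem.List.pyGetD (xs ++ [x]) (t - 1) 0
            let prefix_ones := if prev = 1 then st.1 + 1 else st.1
            let suffix_zeros := if prev = 1 then st.2.1 else st.2.1 - 1
            let penalty := prefix_ones + suffix_zeros
            if penalty < st.2.2.2 then (prefix_ones, suffix_zeros, t, penalty)
            else (prefix_ones, suffix_zeros, st.2.2.1, st.2.2.2))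
          (0, c0, 0, c0)
        = (PySem.List.pyRange 1 ((xs.length : Int) + 1) 1).foldl
          (fun (st : Int × Int × Int × Int) t =>
            let prev := PySem.List.pyGetD xs (t - 1) 0
            let prefix_ones := if prev = 1 then st.1 + 1 else st.1
            let suffix_zeros := if prev = 1 then st.2.1 else st.2.1 - 1
            let penalty := prefix_ones + suffix_zeros
            if penalty < st.2.2.2 then (prefix_ones, suffix_zeros, t, penalty)
            else (prefix_ones, suffix_zeros, st.2.2.1, st.2.2.2))
          (0, c0, 0, c0) := by
      apply PySem.List.foldl_congr_mem
      intro acc t ht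
      rw [PySem.List.mem_pyRange_one] at ht
      have hget : PySem.List.pyGetD (xs ++ [x]) (t - 1) 0 = PySem.List.pyGetD xs (t - 1) 0 := by
        rw [PySem.List.pyGetD_eq_getElem _ _ (by omega) (by simp; omega),
            PySem.List.pyGetD_eq_getElem _ _ (by omega) (by omega)]
        exact List.getElem_append_left (by omega)
      simp only [hget]
    rw [hcongr, ih]
    -- the one extra step, at t = xs.length + 1
    have hprev : PySem.List.pyGetD (xs ++ [x]) (((xs.length : Int) + 1) - 1) 0 = x := by
      have : ((xs.length : Int) + 1) - 1 = (xs.length : Int) := by ring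
      rw [this, PySem.List.pyGetD_natCast]
      simp
    rw [List.foldl_cons, List.foldl_nil]
    simp only [hprev]
    rw [pvTail_append, pvSel_append]
    have hones : pvOnes (xs ++ [x]) = pvOnes xs + (if x = 1 then 1 else 0) := by
      simp only [pvOnes, List.countP_append]
      push_cast
      split <;> simp [*]
    have hpoEq : (if x = 1 then pvOnes xs + 1 else pvOnes xs) = pvOnes (xs ++ [x]) := by
      rw [hones]; split <;> ring
    have hszEq : (if x = 1 then c0 - ((xs.length : Int) - pvOnes xs) else c0 - ((xs.length : Int) - pvOnes xs) - 1)
        = c0 - (((xs ++ [x]).length : Int) - pvOnes (xs ++ [x])) := by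
      simp only [List.length_append, List.length_singleton]
      rw [hones]; push_cast; split <;> ring
    have hsum : pvOnes (xs ++ [x]) + (c0 - (((xs ++ [x]).length : Int) - pvOnes (xs ++ [x])))
        = pvPen c0 (xs ++ [x]) (xs.length + 1) := by
      unfold pvPen
      rw [List.take_of_length_le (by simp)]
      simp only [List.length_append, List.length_singleton]
      push_cast; ring
    rw [hpoEq, hszEq, hsum]
    split <;> rfl

-- B's prefix-ones table is the table of prefix counts
lemma pvB1 (xs : List Int) :
    xs.foldl (fun acc x => acc ++ [PySem.List.pyGetD acc (-1) 0 + (if x = 1 then 1 else 0)]) [0]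
      = (List.range (xs.length + 1)).map (fun t => pvOnes (xs.take t)) := by
  induction xs using List.reverseRecOn with
  | nil => simp [pvOnes]
  | append_singleton xs x ih =>
    rw [List.foldl_append, ih]
    rw [List.foldl_cons, List.foldl_nil]
    rw [PySem.List.pyGetD_neg_one _ _ (by simp)]
    rw [List.length_append, List.length_singleton]
    rw [List.range_succ (n := xs.length + 1), List.map_append]
    congr 1
    · apply List.map_congr_left
      intro t ht
      simp only [List.mem_range] at ht
      simp [List.take_append_of_le_length (by omega : t ≤ xs.length)]
    · have hlast : ((List.range (xs.length + 1)).map (fun t => pvOnes (xs.take t))).getLast (by simp) = pvOnes xs := by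
        rw [List.getLast_eq_getElem]
        simp
      rw [hlast]
      have htake : (xs ++ [x]).take (xs.length + 1) = xs ++ [x] :=
        List.take_of_length_le (by simp)
      simp only [List.map_cons, List.map_nil]
      rw [htake]
      simp only [pvOnes, List.countP_append]
      push_cast
      split <;> simp [*]

lemma pvEnumMapRange (k : Nat) (f : Nat → Int) :
    PySem.List.enumerate ((List.range k).map f) 0
      = (List.range k).map (fun (t : Nat) => ((t : Int), f t)) := by
  induction k with
  | zero => simp
  | succ k ih =>
    rw [List.range_succ, List.map_append, PySem.List.enumerate_append, ih, List.map_append]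
    simp [PySem.List.enumerate]

-- Python's min with key (penalty, t), on pairs whose t strictly increases along the list,
-- is the first strict minimum by penalty
lemma pvMin2Aux (l : List (Int × Int)) (m : Int × Int)
    (hm : ∀ x ∈ l, m.1 < x.1) (hp : l.Pairwise (fun a b : Int × Int => a.1 < b.1)) :
    l.foldl
      (fun acc x =>
        match acc with
        | none => some x
        | some mm =>
          if (decide (x.2 < mm.2) || !decide (mm.2 < x.2) && decide (x.1 < mm.1)) = true
          then some x else some mm)
      (some m)
      = some (pvSel m l) := by
  induction l generalizing m with
  | nil => simp [pvSel]
  | cons x l ih =>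
    rw [List.pairwise_cons] at hp
    have hmx : m.1 < x.1 := hm x (by simp)
    have hnot : decide (x.1 < m.1) = false := by simp; omega
    rw [List.foldl_cons]
    have hsel : pvSel m (x :: l) = pvSel (if x.2 < m.2 then x else m) l := by
      unfold pvSel; rw [List.foldl_cons]
    by_cases hc : x.2 < m.2
    · simp only [hnot, hc, decide_true, Bool.true_or, if_true]
      rw [hsel, if_pos hc]
      exact ih x (fun y hy => hp.1 y hy) hp.2
    · have hstep : (match (some m : Option (Int × Int)) with
          | none => some x
          | some mm => if (decide (x.2 < mm.2) || !decide (mm.2 < x.2) && decide (x.1 < mm.1)) = true then some x else some mm) = some m := by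
        simp [hnot, hc]
      rw [hstep, hsel, if_neg hc]
      exact ih m (fun y hy => hm y (by simp [hy])) hp.2

-- B's whole selection step, reduced to the same first-strict-minimum as A's running best
lemma pvB2 (c0 : Int) (xs : List Int) :
    PySem.List.min2?
      ((PySem.List.enumerate
          (xs.foldl (fun acc x => acc ++ [PySem.List.pyGetD acc (-1) 0 + (if x = 1 then 1 else 0)]) [0]) 0).map
        (fun p => (p.1, c0 - p.1 + 2 * p.2)))
      (fun p => p.2) (fun p => p.1)
      = some (pvSel (0, c0) (pvTail c0 xs)) := by
  rw [pvB1, pvEnumMapRange, List.map_map]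
  have hpairs :
      (List.range (xs.length + 1)).map
          ((fun (p : Int × Int) => (p.1, c0 - p.1 + 2 * p.2)) ∘ (fun (t : Nat) => ((t : Int), pvOnes (xs.take t))))
        = (0, c0) :: pvTail c0 xs := by
    rw [List.range_succ_eq_map, List.map_cons, List.map_map]
    have hhead : ((fun (p : Int × Int) => (p.1, c0 - p.1 + 2 * p.2)) ∘
        (fun (t : Nat) => ((t : Int), pvOnes (xs.take t)))) 0 = ((0 : Int), c0) := by
      simp [pvOnes]
    rw [hhead]
    congr 1
  rw [hpairs]
  have hm : ∀ x ∈ pvTail c0 xs, ((0, c0) : Int × Int).1 < x.1 := by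
    intro x hx
    simp only [pvTail, List.mem_map, List.mem_range] at hx
    obtain ⟨k, -, rfl⟩ := hx
    show (0 : Int) < (k : Int) + 1
    omega
  have hp : (pvTail c0 xs).Pairwise (fun a b : Int × Int => a.1 < b.1) := by
    unfold pvTail
    apply List.pairwise_map.mpr
    exact List.pairwise_lt_range.imp (fun {a b} h => by show (a : Int) + 1 < (b : Int) + 1; omega)
  simp only [PySem.List.min2?, List.foldl_cons]
  rw [PySem.List.foldl_congr_mem _ _
      (fun (acc : Option (Int × Int)) (x : Int × Int) =>
        match acc with
        | none => some x
        | some mm =>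
          if (decide (x.2 < mm.2) || !decide (mm.2 < x.2) && decide (x.1 < mm.1)) = true
          then some x else some mm)
      _ (by intro acc x _; cases acc <;> rfl)]
  exact pvMin2Aux (pvTail c0 xs) (0, c0) hm hp

theorem pv_main (segment : List Int) (h : segment ≠ []) :
    best_cut segment = best_cut_alt segment := by
  simp only [best_cut, best_cut_alt, if_neg h, PySem.List.len_eq]
  rw [pvA1, pvB2]

-- ===== VERDICT (by name: the statement is the Claim_ definition above) =====
theorem best_cut_spec : Claim_equal_best_cut := by
  intro segment _ hpre
  exact pv_main segment hpre
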